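-- pv_equiv track=rewrite | github.com/messabishabib/tppython | parfait.py | combinaison
-- ===== SOURCE A (Python) =====
-- def combinaison(liste):
--     p = []
--     i, imax = 1, 2**len(liste)-1
--     while i <= imax:
--         s = []
--         j, jmax = 0, len(liste)-1
--         while j <= jmax:
--             if (i>>j)&1 == 1:
--                 s.append(liste[j])
--             j += 1
--         p.append(s)
--         i += 1
--     return p
-- ===== SOURCE B (Python) =====
-- def combinaison(liste):
--     # power set by doubling: after each element, append a copy of every
--     # existing subset extended with it; drop the leading empty subset.
--     result = [[]]
--     for x in liste:
--         result = result + [sub + [x] for sub in result]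
--     return result[1:]
-- ===== Notes on version B (the rewrite author's own statement) =====
-- stated objective: alternative
-- what changed: Replaces the nested bitmask loops (test every bit of every counter value) with an incremental power-set doubling fold that extends existing subsets, then drops the empty subset.
import Mathlib
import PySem

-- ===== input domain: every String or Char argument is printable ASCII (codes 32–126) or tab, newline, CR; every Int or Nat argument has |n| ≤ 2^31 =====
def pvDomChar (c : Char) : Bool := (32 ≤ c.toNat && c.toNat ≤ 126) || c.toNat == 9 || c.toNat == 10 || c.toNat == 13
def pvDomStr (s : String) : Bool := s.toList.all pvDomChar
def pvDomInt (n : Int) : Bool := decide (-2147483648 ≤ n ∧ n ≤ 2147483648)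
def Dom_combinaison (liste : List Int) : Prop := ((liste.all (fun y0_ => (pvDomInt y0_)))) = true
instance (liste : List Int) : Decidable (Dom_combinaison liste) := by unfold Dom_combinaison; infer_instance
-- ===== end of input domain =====

-- B replaces A's nested bitmask loops with an incremental power-set doubling fold
-- (then drops the empty subset): an alternative algorithm, proved to return A's exact list.


-- ===== PORT A =====
-- inner while loop: j runs 0..len(liste)-1 (j ≤ len-1 over Python ints ↔ j < len over Nat);
-- i stays in 1..2^len-1 so it is carried as a Nat; liste[j] is in range, so getD is exact.
def combinaisonInner (liste : List Int) (i : Nat) (j : Nat) : List Int :=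
  if _h : j < liste.length then
    (if (i >>> j) &&& 1 = 1 then [liste.getD j 0] else []) ++ combinaisonInner liste i (j + 1)
  else []
termination_by liste.length - j

-- outer while loop: i runs 1..imax, appending each inner subset s to p
def combinaisonOuter (liste : List Int) (imax : Nat) (i : Nat) : List (List Int) :=
  if _h : i ≤ imax then
    combinaisonInner liste i 0 :: combinaisonOuter liste imax (i + 1)
  else []
termination_by imax + 1 - i

def combinaison (liste : List Int) : List (List Int) :=
  combinaisonOuter liste (2 ^ liste.length - 1) 1

-- ===== PORT B =====
def combinaison_alt (liste : List Int) : List (List Int) :=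
  (liste.foldl (fun result x => result ++ result.map (fun sub => sub ++ [x])) [[]]).drop 1

-- ===== PRECONDITION & SPEC =====
def Spec_combinaison (liste : List Int) (out : List (List Int)) : Prop := out = combinaison_alt liste
instance (liste : List Int) (out : List (List Int)) : Decidable (Spec_combinaison liste out) := by unfold Spec_combinaison; infer_instance

-- ===== CLAIM (what is proved, stated in full; the proofs are below) =====
def Claim_equal_combinaison : Prop := ∀ (liste : List Int), Dom_combinaison liste → Spec_combinaison liste (combinaison liste)

-- ===== LEMMAS AND PROOFS =====

-- subset selected by the bits of i, structural on the list
def bitsSubset : List Int → Nat → List Int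
  | [], _ => []
  | x :: xs, i => (if i &&& 1 = 1 then [x] else []) ++ bitsSubset xs (i >>> 1)

theorem inner_shift (xs : List Int) (x : Int) (i : Nat) :
    ∀ j, combinaisonInner (x :: xs) i (j + 1) = combinaisonInner xs (i >>> 1) j := by
  intro j
  induction hd : xs.length - j using Nat.strong_induction_on generalizing j with
  | _ d ih =>
    conv_lhs => rw [combinaisonInner]
    conv_rhs => rw [combinaisonInner]
    by_cases h : j < xs.length
    · rw [dif_pos (by simpa using h), dif_pos h,
        ih (xs.length - (j + 1)) (by omega) (j + 1) rfl]
      rw [show i >>> (j + 1) = i >>> 1 >>> j from by rw [Nat.add_comm, Nat.shiftRight_add],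
        List.getD_cons_succ]
    · rw [dif_neg (by simpa using h), dif_neg h]

theorem inner_eq_bits (liste : List Int) (i : Nat) :
    combinaisonInner liste i 0 = bitsSubset liste i := by
  induction liste generalizing i with
  | nil => rw [combinaisonInner]; simp [bitsSubset]
  | cons x xs ih =>
    rw [combinaisonInner, bitsSubset]
    simp only [List.length_cons, Nat.succ_pos, dif_pos]
    rw [inner_shift, ih]
    rfl

theorem bits_append_lo (l : List Int) (x : Int) :
    ∀ k, k < 2 ^ l.length → bitsSubset (l ++ [x]) k = bitsSubset l k := by
  induction l with
  | nil =>
    intro k hk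
    have hk0 : k = 0 := by simpa [Nat.lt_one_iff] using hk
    subst hk0
    simp [bitsSubset]
  | cons y l' ih =>
    intro k hk
    simp only [List.cons_append, bitsSubset]
    rw [ih (k >>> 1) (by rw [Nat.shiftRight_one]; simp only [List.length_cons, pow_succ] at hk; omega)]

theorem bits_append_hi (l : List Int) (x : Int) :
    ∀ k, k < 2 ^ l.length → bitsSubset (l ++ [x]) (2 ^ l.length + k) = bitsSubset l k ++ [x] := by
  induction l with
  | nil =>
    intro k hk
    have hk0 : k = 0 := by simpa [Nat.lt_one_iff] using hk
    subst hk0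
    simp [bitsSubset]
  | cons y l' ih =>
    intro k hk
    simp only [List.length_cons, List.cons_append, bitsSubset]
    have h1 : (2 ^ (l'.length + 1) + k) &&& 1 = k &&& 1 := by
      simp only [Nat.and_one_is_mod, pow_succ]
      omega
    have h2 : (2 ^ (l'.length + 1) + k) >>> 1 = 2 ^ l'.length + k >>> 1 := by
      simp only [Nat.shiftRight_one, pow_succ]
      omega
    rw [h1, h2, ih (k >>> 1) (by rw [Nat.shiftRight_one]; simp only [List.length_cons, pow_succ] at hk; omega)]
    simp

theorem fold_eq_bits (liste : List Int) :
    liste.foldl (fun result x => result ++ result.map (fun sub => sub ++ [x])) [[]]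
      = (List.range (2 ^ liste.length)).map (bitsSubset liste) := by
  induction liste using List.reverseRecOn with
  | nil => simp [bitsSubset]
  | append_singleton l x ih =>
    rw [List.foldl_append, List.foldl_cons, List.foldl_nil, ih]
    have hlen : (l ++ [x]).length = l.length + 1 := by simp
    rw [hlen, pow_succ, Nat.mul_two, List.range_add, List.map_append, List.map_map, List.map_map]
    congr 1
    · exact List.map_congr_left (fun k hk => (bits_append_lo l x k (List.mem_range.mp hk)).symm)
    · exact List.map_congr_left (fun k hk => by
        simp only [Function.comp_apply]
        exact (bits_append_hi l x k (List.mem_range.mp hk)).symm)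

theorem outer_eq_range (liste : List Int) (imax : Nat) :
    ∀ d i, imax + 1 - i = d →
      combinaisonOuter liste imax i
        = (List.range d).map (fun k => combinaisonInner liste (i + k) 0) := by
  intro d
  induction d with
  | zero =>
    intro i hi
    rw [combinaisonOuter]
    simp only [List.range_zero, List.map_nil]
    rw [dif_neg (by omega)]
  | succ d ih =>
    intro i hi
    rw [combinaisonOuter, dif_pos (by omega), ih (i + 1) (by omega),
      List.range_succ_eq_map, List.map_cons, List.map_map]
    congr 1
    exact List.map_congr_left (fun k _ => by
      simp only [Function.comp_apply]
      congr 1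
      omega)

-- ===== VERDICT (by name: the statement is the Claim_ definition above) =====
theorem combinaison_spec : Claim_equal_combinaison := by
  intro liste _
  unfold Spec_combinaison combinaison combinaison_alt
  rw [fold_eq_bits]
  rw [outer_eq_range liste (2 ^ liste.length - 1) (2 ^ liste.length - 1) 1 (by omega)]
  have h2 : 2 ^ liste.length = (2 ^ liste.length - 1) + 1 := by
    have := Nat.one_le_two_pow (n := liste.length); omega
  rw [h2, List.range_succ_eq_map, List.map_cons, List.drop_succ_cons, List.drop_zero, List.map_map]
  exact List.map_congr_left (fun k _ => by simp [inner_eq_bits, Nat.add_comm])
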